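-- pv_equiv track=rewrite | github.com/jojoC0de/CapstoneProject2016 | Capstone Spring 2016/anim_init.py | determine_text
-- ===== SOURCE A (Python) =====
-- display_text = ['',
--                 'Player chose ',
--                 'Boss is thinking',
--                 'Boss has decided',
--                 'Player uses  ',
--                 'Boss uses ',
--                 'Player used ',
--                 'Boss used ',
--                 'OH NO!!',
--                 'The attack was blocked',
--                 'The attack was countered',
--                 'But the attack has broken through the ',
--                 ' defenses',
--                 'But the ',
--                 '\'s attempt to counter has failed',
--                 'The attack becomes even more powerful',
--                 'The ',
--                 ' suffers from the ',
--                 '\'s recoil',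
--                 'Hero',
--                 'Boss',
--                 'Strike',
--                 'Block',
--                 'Counter',
--                 'Pierce']
--
-- simple_strings_hero = [-1,-4,-6]
--
-- simple_strings_boss = [-5,-7]
--
-- simple_strings = [-2,-3,-8,-9,-10,-15]
--
-- complex_strings = [-11,-13]
--
-- normal_pause_strings = [-8,-9]
--
-- long_pause_strings = [-11,-13,-15]
--
-- copy_text_animations = [20,21]
--
-- def determine_text(hero_move,boss_move,animations):
--    displayText = []
--    hero_move += 1
--    boss_move += 1
--    prev_animation = 0
--
--    #print animations
--    for i in range(0,len(animations)):
--
--       if animations[i] < 0: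
--          index = -1 * animations[i]
--          if animations[i] in simple_strings_hero:
--             displayText.append(display_text[index]+display_text[hero_move])
--          elif  animations[i] in simple_strings_boss:
--             displayText.append(display_text[index]+display_text[boss_move])
--          elif animations[i] in simple_strings:
--             displayText.append(display_text[index])
--          elif animations[i] in complex_strings:
--             if prev_animation < 10:
--                displayText.append(display_text[index]+display_text[19]+display_text[(index+1)])
--             else:
--                displayText.append(display_text[index]+display_text[20]+display_text[(index+1)])
--          else:
--             if prev_animation < 10:
--                displayText.append(display_text[index]+display_text[20]+display_text[(index+1)]+display_text[19]+display_text[index+2])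
--             else:
--                displayText.append(display_text[index]+display_text[19]+display_text[(index+1)]+display_text[20]+display_text[index+2])
--          if animations[i] in normal_pause_strings:
--             animations[i] = 23
--          elif animations[i] in long_pause_strings:
--             animations[i] = 23
--          else:
--             animations[i] = 22
--       else:
--          prev_animation = animations[i]
--          if animations[i] in copy_text_animations:
--             displayText.append(displayText[(len(displayText)-1)])
--          else:
--             displayText.append(display_text[0])
--
--    #print animations
--
--    return (displayText, animations)
-- ===== SOURCE B (Python) =====
-- # B: precompute per-code lookup tables once, then the loop is a pure dict lookup.
-- # Mutates `animations` in place like A; equivalence is about the return value.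
--
-- display_text = ['',
--                 'Player chose ',
--                 'Boss is thinking',
--                 'Boss has decided',
--                 'Player uses  ',
--                 'Boss uses ',
--                 'Player used ',
--                 'Boss used ',
--                 'OH NO!!',
--                 'The attack was blocked',
--                 'The attack was countered',
--                 'But the attack has broken through the ',
--                 ' defenses',
--                 'But the ',
--                 '\'s attempt to counter has failed',
--                 'The attack becomes even more powerful',
--                 'The ',
--                 ' suffers from the ',
--                 '\'s recoil',
--                 'Hero',
--                 'Boss',
--                 'Strike',
--                 'Block',
--                 'Counter',
--                 'Pierce']
--
-- def determine_text(hero_move, boss_move, animations):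
--     # One record per distinct negative code: text for prev<10, text for prev>=10,
--     # and the in-place replacement value.
--     text_lo = {}
--     text_hi = {}
--     repl = {}
--     for a in set(animations):
--         if a >= 0:
--             continue
--         k = -a
--         if a in (-1, -4, -6):
--             s = display_text[k] + display_text[hero_move + 1]
--             text_lo[a] = text_hi[a] = s
--         elif a in (-5, -7):
--             s = display_text[k] + display_text[boss_move + 1]
--             text_lo[a] = text_hi[a] = s
--         elif a in (-2, -3, -8, -9, -10, -15):
--             text_lo[a] = text_hi[a] = display_text[k]
--         elif a in (-11, -13):
--             text_lo[a] = display_text[k] + display_text[19] + display_text[k + 1]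
--             text_hi[a] = display_text[k] + display_text[20] + display_text[k + 1]
--         else:
--             text_lo[a] = (display_text[k] + display_text[20] + display_text[k + 1]
--                           + display_text[19] + display_text[k + 2])
--             text_hi[a] = (display_text[k] + display_text[19] + display_text[k + 1]
--                           + display_text[20] + display_text[k + 2])
--         repl[a] = 23 if a in (-8, -9, -11, -13, -15) else 22
--
--     out = []
--     prev = 0
--     for i, a in enumerate(animations):
--         if a < 0:
--             out.append((text_lo if prev < 10 else text_hi)[a])
--             animations[i] = repl[a]
--         else:
--             prev = a
--             out.append(out[-1] if a in (20, 21) else '')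
--     return (out, animations)
-- ===== Notes on version B (the rewrite author's own statement) =====
-- stated objective: alternative
-- what changed: B precomputes, once per call, dispatch tables keyed by distinct negative animation code (prev<10 text, prev>=10 text, replacement value), so the main loop's five-branch elif ladder becomes a single dict lookup; the non-negative copy-last/blank logic and the in-place mutation of animations are kept.
import Mathlib
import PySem

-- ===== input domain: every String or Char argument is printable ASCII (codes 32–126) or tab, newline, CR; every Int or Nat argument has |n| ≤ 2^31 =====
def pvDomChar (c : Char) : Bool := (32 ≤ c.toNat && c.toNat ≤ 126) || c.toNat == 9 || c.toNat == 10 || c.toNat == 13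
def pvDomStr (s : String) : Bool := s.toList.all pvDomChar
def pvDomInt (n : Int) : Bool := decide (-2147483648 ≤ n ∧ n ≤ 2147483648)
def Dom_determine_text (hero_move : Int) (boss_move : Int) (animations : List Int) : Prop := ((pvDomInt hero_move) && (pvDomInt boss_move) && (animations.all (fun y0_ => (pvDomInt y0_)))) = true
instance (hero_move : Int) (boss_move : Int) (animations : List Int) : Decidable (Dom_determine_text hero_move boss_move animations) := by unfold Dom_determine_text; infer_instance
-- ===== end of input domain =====

-- B replaces A's per-iteration five-branch elif ladder by lookup tables built once per call
-- (one record per distinct negative code); objective: alternative/simpler loop. Both Pythons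
-- mutate `animations` in place identically; the equivalence proved is about the return value.

-- ===== PORT A =====
-- the module-level display_text table, shared context of both programs
def dtTable : List String := ["",
  "Player chose ", "Boss is thinking", "Boss has decided", "Player uses  ",
  "Boss uses ", "Player used ", "Boss used ", "OH NO!!",
  "The attack was blocked", "The attack was countered",
  "But the attack has broken through the ", " defenses", "But the ",
  "'s attempt to counter has failed", "The attack becomes even more powerful",
  "The ", " suffers from the ", "'s recoil", "Hero", "Boss",
  "Strike", "Block", "Counter", "Pierce"]

-- display_text[i]; total form of Python indexing (none-case excluded by Pre_)
def dtGet (i : Int) : String := (PySem.List.pyGet? dtTable i).getD ""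

-- one iteration of A's for-loop; state = (displayText, animations-so-far, prev_animation)
def detStepA (hm bm : Int) (st : List String × List Int × Int) (a : Int) :
    List String × List Int × Int :=
  let dt := st.1; let ans := st.2.1; let prev := st.2.2
  if a < 0 then
    let index : Int := -1 * a
    let dt :=
      if a ∈ ([-1, -4, -6] : List Int) then
        dt ++ [dtGet index ++ dtGet hm]
      else if a ∈ ([-5, -7] : List Int) then
        dt ++ [dtGet index ++ dtGet bm]
      else if a ∈ ([-2, -3, -8, -9, -10, -15] : List Int) then
        dt ++ [dtGet index]
      else if a ∈ ([-11, -13] : List Int) then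
        if prev < 10 then dt ++ [dtGet index ++ dtGet 19 ++ dtGet (index + 1)]
        else dt ++ [dtGet index ++ dtGet 20 ++ dtGet (index + 1)]
      else
        if prev < 10 then
          dt ++ [dtGet index ++ dtGet 20 ++ dtGet (index + 1) ++ dtGet 19 ++ dtGet (index + 2)]
        else
          dt ++ [dtGet index ++ dtGet 19 ++ dtGet (index + 1) ++ dtGet 20 ++ dtGet (index + 2)]
    let ans :=
      if a ∈ ([-8, -9] : List Int) then ans ++ [23]
      else if a ∈ ([-11, -13, -15] : List Int) then ans ++ [23]
      else ans ++ [22]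
    (dt, ans, prev)
  else
    let prev := a
    let dt :=
      if a ∈ ([20, 21] : List Int) then
        dt ++ [(PySem.List.pyGet? dt ((dt.length : Int) - 1)).getD ""]
      else dt ++ [dtGet 0]
    (dt, ans ++ [a], prev)

def determine_text (hero_move : Int) (boss_move : Int) (animations : List Int) :
    List String × List Int :=
  let hm := hero_move + 1
  let bm := boss_move + 1
  let r := animations.foldl (detStepA hm bm) ([], [], 0)
  (r.1, r.2.1)

-- ===== PORT B =====
-- Source B's table-building loop body: insert the record for one distinct negative code
def buildStepB (hero_move boss_move : Int)
    (st : PySem.Dict Int String × PySem.Dict Int String × PySem.Dict Int Int) (a : Int) :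
    PySem.Dict Int String × PySem.Dict Int String × PySem.Dict Int Int :=
  if 0 ≤ a then st else
  let lo := st.1; let hi := st.2.1; let rp := st.2.2
  let k : Int := -a
  let p :=
    if a ∈ ([-1, -4, -6] : List Int) then
      let s := dtGet k ++ dtGet (hero_move + 1)
      (lo.insert a s, hi.insert a s)
    else if a ∈ ([-5, -7] : List Int) then
      let s := dtGet k ++ dtGet (boss_move + 1)
      (lo.insert a s, hi.insert a s)
    else if a ∈ ([-2, -3, -8, -9, -10, -15] : List Int) then
      (lo.insert a (dtGet k), hi.insert a (dtGet k))
    else if a ∈ ([-11, -13] : List Int) then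
      (lo.insert a (dtGet k ++ dtGet 19 ++ dtGet (k + 1)),
       hi.insert a (dtGet k ++ dtGet 20 ++ dtGet (k + 1)))
    else
      (lo.insert a (dtGet k ++ dtGet 20 ++ dtGet (k + 1) ++ dtGet 19 ++ dtGet (k + 2)),
       hi.insert a (dtGet k ++ dtGet 19 ++ dtGet (k + 1) ++ dtGet 20 ++ dtGet (k + 2)))
  (p.1, p.2, rp.insert a (if a ∈ ([-8, -9, -11, -13, -15] : List Int) then 23 else 22))

-- Source B's main loop body: pure lookups; state = (out, animations-so-far, prev)
def loopStepB (lo hi : PySem.Dict Int String) (rp : PySem.Dict Int Int)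
    (st : List String × List Int × Int) (a : Int) : List String × List Int × Int :=
  if a < 0 then
    (st.1 ++ [(if st.2.2 < 10 then lo else hi).getD a ""],
     st.2.1 ++ [rp.getD a 0], st.2.2)
  else
    (st.1 ++ [if a ∈ ([20, 21] : List Int) then (PySem.List.pyGet? st.1 (-1)).getD "" else ""],
     st.2.1 ++ [a], a)

def determine_text_alt (hero_move : Int) (boss_move : Int) (animations : List Int) :
    List String × List Int :=
  let t := (PySem.Set.ofList animations).foldl (buildStepB hero_move boss_move)
    (PySem.Dict.empty, PySem.Dict.empty, PySem.Dict.empty)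
  let r := animations.foldl (loopStepB t.1 t.2.1 t.2.2) ([], [], 0)
  (r.1, r.2.1)

-- ===== PRECONDITION & SPEC =====
-- Pre_ excludes exactly the inputs where Python A raises IndexError: a negative code below -22
-- (display_text[index+2] out of range), a hero/boss index outside Python's −25..24 range when a
-- hero/boss string code occurs, or a copy-text code (20/21) first, when displayText is still empty.
def Pre_determine_text (hero_move : Int) (boss_move : Int) (animations : List Int) : Prop :=
  (∀ a ∈ animations, a < 0 → -22 ≤ a) ∧
  ((∃ a ∈ animations, a = -1 ∨ a = -4 ∨ a = -6) → -26 ≤ hero_move ∧ hero_move ≤ 23) ∧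
  ((∃ a ∈ animations, a = -5 ∨ a = -7) → -26 ≤ boss_move ∧ boss_move ≤ 23) ∧
  (∀ h, animations.head? = some h → ¬(h = 20 ∨ h = 21))
instance (hero_move : Int) (boss_move : Int) (animations : List Int) : Decidable (Pre_determine_text hero_move boss_move animations) := by unfold Pre_determine_text; infer_instance

def pvWitness_determine_text : Int × Int × List Int := (0, 2, [-1, 20, -11, 5, -8])

def Spec_determine_text (hero_move : Int) (boss_move : Int) (animations : List Int) (out : List String × List Int) : Prop := out = determine_text_alt hero_move boss_move animations
instance (hero_move : Int) (boss_move : Int) (animations : List Int) (out : List String × List Int) : Decidable (Spec_determine_text hero_move boss_move animations out) := by unfold Spec_determine_text; infer_instance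

-- ===== CLAIM (what is proved, stated in full; the proofs are below) =====
def Claim_equal_determine_text : Prop := ∀ (hero_move : Int) (boss_move : Int) (animations : List Int), Dom_determine_text hero_move boss_move animations → Pre_determine_text hero_move boss_move animations → Spec_determine_text hero_move boss_move animations (determine_text hero_move boss_move animations)

-- ===== LEMMAS AND PROOFS =====

-- the text each branch produces, as pure functions of the code (prev<10 / prev≥10 versions)
def fLo (h b a : Int) : String :=
  if a ∈ ([-1, -4, -6] : List Int) then dtGet (-a) ++ dtGet h
  else if a ∈ ([-5, -7] : List Int) then dtGet (-a) ++ dtGet b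
  else if a ∈ ([-2, -3, -8, -9, -10, -15] : List Int) then dtGet (-a)
  else if a ∈ ([-11, -13] : List Int) then dtGet (-a) ++ dtGet 19 ++ dtGet (-a + 1)
  else dtGet (-a) ++ dtGet 20 ++ dtGet (-a + 1) ++ dtGet 19 ++ dtGet (-a + 2)

def fHi (h b a : Int) : String :=
  if a ∈ ([-1, -4, -6] : List Int) then dtGet (-a) ++ dtGet h
  else if a ∈ ([-5, -7] : List Int) then dtGet (-a) ++ dtGet b
  else if a ∈ ([-2, -3, -8, -9, -10, -15] : List Int) then dtGet (-a)
  else if a ∈ ([-11, -13] : List Int) then dtGet (-a) ++ dtGet 20 ++ dtGet (-a + 1)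
  else dtGet (-a) ++ dtGet 19 ++ dtGet (-a + 1) ++ dtGet 20 ++ dtGet (-a + 2)

def fRp (a : Int) : Int := if a ∈ ([-8, -9, -11, -13, -15] : List Int) then 23 else 22

lemma stepA_neg (h b : Int) (st : List String × List Int × Int) (a : Int) (ha : a < 0) :
    detStepA h b st a =
      (st.1 ++ [if st.2.2 < 10 then fLo h b a else fHi h b a], st.2.1 ++ [fRp a], st.2.2) := by
  simp only [detStepA, fLo, fHi, fRp, if_pos ha, neg_one_mul, List.mem_cons,
    List.not_mem_nil, or_false]
  split_ifs <;> simp_all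

lemma stepA_nonneg (h b lo hi : _) (rp : PySem.Dict Int Int)
    (st : List String × List Int × Int) (a : Int) (ha : ¬ a < 0) :
    detStepA h b st a = loopStepB lo hi rp st a := by
  simp only [detStepA, loopStepB, if_neg ha]
  have hlast : (PySem.List.pyGet? st.1 ((st.1.length : Int) - 1)).getD ""
      = (PySem.List.pyGet? st.1 (-1)).getD "" := by
    rcases List.eq_nil_or_concat st.1 with h0 | ⟨ys, y, hy⟩
    · simp [h0]
    · rw [hy, List.concat_eq_append, PySem.List.pyGet?_neg_one_append_singleton]
      have h1 : (((ys ++ [y]).length : Int)) - 1 = (ys.length : Int) := by simp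
      rw [h1, PySem.List.pyGet?_natCast]
      simp
  rw [hlast]
  split_ifs <;> simp [dtGet, dtTable, PySem.List.pyGet?, PySem.List.pyIdx?]

-- the build step is insertion of the record functions at key a
lemma buildStepB_neg (hm bm : Int) (st) (a : Int) (ha : a < 0) :
    buildStepB hm bm st a =
      (st.1.insert a (fLo (hm + 1) (bm + 1) a), st.2.1.insert a (fHi (hm + 1) (bm + 1) a),
       st.2.2.insert a (fRp a)) := by
  simp only [buildStepB, fLo, fHi, fRp, if_neg (by omega : ¬ 0 ≤ a)]
  split_ifs <;> rfl

-- once a's record is in the tables, it stays there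
lemma build_preserve (hm bm : Int) (L : List Int) (a : Int) (ha : a < 0) (st)
    (h1 : st.1.getD a "" = fLo (hm + 1) (bm + 1) a)
    (h2 : st.2.1.getD a "" = fHi (hm + 1) (bm + 1) a)
    (h3 : st.2.2.getD a (0 : Int) = fRp a) :
    (L.foldl (buildStepB hm bm) st).1.getD a "" = fLo (hm + 1) (bm + 1) a ∧
    (L.foldl (buildStepB hm bm) st).2.1.getD a "" = fHi (hm + 1) (bm + 1) a ∧
    (L.foldl (buildStepB hm bm) st).2.2.getD a (0 : Int) = fRp a := by
  induction L generalizing st with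
  | nil => exact ⟨h1, h2, h3⟩
  | cons c L ih =>
    simp only [List.foldl_cons]
    by_cases hc : c < 0
    · rw [buildStepB_neg hm bm st c hc]
      by_cases hca : a = c
      · subst hca
        exact ih _ (by simp [PySem.Dict.getD_insert]) (by simp [PySem.Dict.getD_insert])
          (by simp [PySem.Dict.getD_insert])
      · exact ih _ (by simp [PySem.Dict.getD_insert, hca, h1])
          (by simp [PySem.Dict.getD_insert, hca, h2]) (by simp [PySem.Dict.getD_insert, hca, h3])
    · have : buildStepB hm bm st c = st := by simp [buildStepB, if_pos (by omega : (0:Int) ≤ c)]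
      rw [this]; exact ih _ h1 h2 h3

-- membership in the build list yields the record
lemma build_mem (hm bm : Int) (L : List Int) (a : Int) (ha : a < 0) (haL : a ∈ L) (st) :
    (L.foldl (buildStepB hm bm) st).1.getD a "" = fLo (hm + 1) (bm + 1) a ∧
    (L.foldl (buildStepB hm bm) st).2.1.getD a "" = fHi (hm + 1) (bm + 1) a ∧
    (L.foldl (buildStepB hm bm) st).2.2.getD a (0 : Int) = fRp a := by
  induction L generalizing st with
  | nil => cases haL
  | cons c L ih =>
    simp only [List.foldl_cons]
    rcases List.mem_cons.mp haL with rfl | hmem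
    · rw [buildStepB_neg hm bm st a ha]
      by_cases hL : a ∈ L
      · exact ih hL _
      · exact build_preserve hm bm L a ha _ (by simp [PySem.Dict.getD_insert])
          (by simp [PySem.Dict.getD_insert]) (by simp [PySem.Dict.getD_insert])
    · exact ih hmem _

-- main loop agreement, given the tables carry the records of every code in the list
lemma loop_agree (h b : Int) (lo hi : PySem.Dict Int String) (rp : PySem.Dict Int Int)
    (L : List Int)
    (htab : ∀ a ∈ L, a < 0 →
      lo.getD a "" = fLo h b a ∧ hi.getD a "" = fHi h b a ∧ rp.getD a (0 : Int) = fRp a)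
    (st : List String × List Int × Int) :
    L.foldl (detStepA h b) st = L.foldl (loopStepB lo hi rp) st := by
  induction L generalizing st with
  | nil => rfl
  | cons a L ih =>
    simp only [List.foldl_cons]
    have hstep : detStepA h b st a = loopStepB lo hi rp st a := by
      by_cases ha : a < 0
      · obtain ⟨e1, e2, e3⟩ := htab a (List.mem_cons_self) ha
        rw [stepA_neg h b st a ha]
        simp only [loopStepB, if_pos ha]
        rw [e3]
        by_cases hp : st.2.2 < 10 <;> simp [hp, e1, e2]
      · exact stepA_nonneg h b lo hi rp st a ha
    rw [hstep]
    exact ih (fun x hx => htab x (List.mem_cons_of_mem _ hx)) _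

-- ===== VERDICT (by name: the statement is the Claim_ definition above) =====
theorem determine_text_spec : Claim_equal_determine_text := by
  intro hm bm anims _ _
  unfold Spec_determine_text determine_text determine_text_alt
  have htab : ∀ a ∈ anims, a < 0 →
      ((PySem.Set.ofList anims).foldl (buildStepB hm bm)
        (PySem.Dict.empty, PySem.Dict.empty, PySem.Dict.empty)).1.getD a "" = fLo (hm + 1) (bm + 1) a ∧
      ((PySem.Set.ofList anims).foldl (buildStepB hm bm)
        (PySem.Dict.empty, PySem.Dict.empty, PySem.Dict.empty)).2.1.getD a "" = fHi (hm + 1) (bm + 1) a ∧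
      ((PySem.Set.ofList anims).foldl (buildStepB hm bm)
        (PySem.Dict.empty, PySem.Dict.empty, PySem.Dict.empty)).2.2.getD a (0 : Int) = fRp a := by
    intro a haA ha
    exact build_mem hm bm _ a ha (by simp [PySem.Set.mem_ofList, haA]) _
  exact congrArg (fun r => (r.1, r.2.1)) (loop_agree (hm + 1) (bm + 1) _ _ _ anims htab ([], [], 0))
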